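-- pv_equiv track=rewrite | github.com/fachebot/wyckoff-ai | wyckoff_ai/wyckoff/sequence.py | _check_event_order
-- ===== SOURCE A (Python) =====
-- def _check_event_order(event_types: list[str], sequence_def: list[dict]) -> bool:
--     """
--     检查事件顺序是否符合序列定义
--     """
--     # 构建序列中每个事件的阶段索引
--     event_phase_map: dict[str, int] = {}
--     for idx, step in enumerate(sequence_def):
--         for e in step["events"]:
--             if e not in event_phase_map:
--                 event_phase_map[e] = idx
--
--     # 检查事件出现顺序
--     last_phase = -1
--     violations = 0
--     for et in event_types:
--         if et in event_phase_map:
--             phase = event_phase_map[et]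
--             if phase < last_phase:
--                 violations += 1
--             last_phase = max(last_phase, phase)
--
--     return violations == 0
-- ===== SOURCE B (Python) =====
-- def _check_event_order(event_types: list[str], sequence_def: list[dict]) -> bool:
--     def phase(et):
--         for idx, step in enumerate(sequence_def):
--             if et in step["events"]:
--                 return idx
--         return None
--     phases = [p for p in (phase(et) for et in event_types) if p is not None]
--     return all(a <= b for a, b in zip(phases, phases[1:]))
-- ===== Notes on version B (the rewrite author's own statement) =====
-- stated objective: simpler
-- what changed: Drops the phase dictionary entirely: each event's phase is found by a direct first-step search over sequence_def, and the order check becomes an adjacent-pair (zip) monotonicity test instead of the running-max/violation counter.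
import Mathlib
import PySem

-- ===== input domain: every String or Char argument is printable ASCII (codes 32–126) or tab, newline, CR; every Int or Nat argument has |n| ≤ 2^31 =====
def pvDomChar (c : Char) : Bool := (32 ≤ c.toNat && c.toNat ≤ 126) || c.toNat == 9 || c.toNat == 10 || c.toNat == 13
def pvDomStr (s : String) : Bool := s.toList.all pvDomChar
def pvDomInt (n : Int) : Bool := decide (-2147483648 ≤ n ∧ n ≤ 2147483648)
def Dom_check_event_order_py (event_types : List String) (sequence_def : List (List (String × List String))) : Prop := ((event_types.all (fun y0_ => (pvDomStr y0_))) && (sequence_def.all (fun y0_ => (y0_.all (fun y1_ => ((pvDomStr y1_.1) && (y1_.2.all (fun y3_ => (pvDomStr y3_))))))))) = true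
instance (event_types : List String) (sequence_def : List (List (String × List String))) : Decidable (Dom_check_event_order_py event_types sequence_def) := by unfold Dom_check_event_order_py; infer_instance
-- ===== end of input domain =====

-- B drops A's phase dictionary: each event's phase is found by a direct first-step search over
-- sequence_def, and the order check is an adjacent-pair monotonicity test (objective: simpler).

-- ===== PORT A =====
-- first loop of A: build the first-occurrence phase map
def pvBuildMapA (sequence_def : List (List (String × List String))) : PySem.Dict String Int :=
  (PySem.List.enumerate sequence_def).foldl
    (fun m p =>
      (((PySem.Dict.mk p.2).get? "events").getD []).foldl
        (fun m e => if m.contains e then m else m.insert e p.1) m)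
    PySem.Dict.empty

def check_event_order_py (event_types : List String) (sequence_def : List (List (String × List String))) : Bool :=
  let event_phase_map := pvBuildMapA sequence_def
  let st := event_types.foldl
    (fun (st : Int × Int) et =>
      if event_phase_map.contains et then
        let phase := (event_phase_map.get? et).getD 0
        let violations := if phase < st.1 then st.2 + 1 else st.2
        (max st.1 phase, violations)
      else st)
    (-1, 0)
  st.2 == 0

-- ===== PORT B =====
-- B's inner helper `phase`: index of the first step whose events contain et
def pvPhaseB (L : List (Int × List (String × List String))) (et : String) : Option Int :=
  match L with
  | [] => none
  | p :: rest =>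
    if (((PySem.Dict.mk p.2).get? "events").getD []).contains et then some p.1
    else pvPhaseB rest et

def check_event_order_py_alt (event_types : List String) (sequence_def : List (List (String × List String))) : Bool :=
  let phases := event_types.filterMap (fun et => pvPhaseB (PySem.List.enumerate sequence_def) et)
  (phases.zip phases.tail).all (fun q => decide (q.1 ≤ q.2))

-- ===== PRECONDITION & SPEC =====
-- Pre_ excludes exactly the inputs on which A raises KeyError: some step lacks the "events" key.
def Pre_check_event_order_py (event_types : List String) (sequence_def : List (List (String × List String))) : Prop :=
  ∀ step ∈ sequence_def, (PySem.Dict.mk step).contains "events" = true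
instance (event_types : List String) (sequence_def : List (List (String × List String))) : Decidable (Pre_check_event_order_py event_types sequence_def) := by unfold Pre_check_event_order_py; infer_instance

def pvWitness_check_event_order_py : List String × (List (List (String × List String))) :=
  (["a", "b"], [[("events", ["a"])], [("events", ["b"])]])

def Spec_check_event_order_py (event_types : List String) (sequence_def : List (List (String × List String))) (out : Bool) : Prop := out = check_event_order_py_alt event_types sequence_def
instance (event_types : List String) (sequence_def : List (List (String × List String))) (out : Bool) : Decidable (Spec_check_event_order_py event_types sequence_def out) := by unfold Spec_check_event_order_py; infer_instance

-- ===== CLAIM (what is proved, stated in full; the proofs are below) =====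
def Claim_equal_check_event_order_py : Prop := ∀ (event_types : List String) (sequence_def : List (List (String × List String))), Dom_check_event_order_py event_types sequence_def → Pre_check_event_order_py event_types sequence_def → Spec_check_event_order_py event_types sequence_def (check_event_order_py event_types sequence_def)

-- ===== LEMMAS AND PROOFS =====

-- one inner (events) loop of A: first-wins insert, as a lookup
theorem inner_get (es : List String) (idx : Int) (m : PySem.Dict String Int) (k : String) :
    (es.foldl (fun m e => if m.contains e then m else m.insert e idx) m).get? k
      = (m.get? k).or (if es.contains k then some idx else none) := by
  induction es generalizing m with
  | nil => simp
  | cons e es ih =>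
    simp only [List.foldl_cons]
    by_cases hc : m.contains e = true
    · rw [if_pos hc, ih]
      by_cases hk : k = e
      · subst hk
        have : (m.get? k).isSome := by rw [← PySem.Dict.contains_eq_isSome_get?]; exact hc
        rcases Option.isSome_iff_exists.1 this with ⟨v, hv⟩
        simp [hv]
      · simp [hk]
    · rw [if_neg hc, ih]
      have hme : m.get? e = none := by
        have := PySem.Dict.contains_eq_isSome_get? m e
        rw [this] at hc; simpa using hc
      by_cases hk : k = e
      · subst hk
        simp [hme]
      · rw [PySem.Dict.get?_insert]
        simp [hk]

-- A's whole first loop equals B's first-step search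
theorem outer_get (L : List (Int × List (String × List String))) (m : PySem.Dict String Int) (k : String) :
    (L.foldl (fun m p =>
        (((PySem.Dict.mk p.2).get? "events").getD []).foldl
          (fun m e => if m.contains e then m else m.insert e p.1) m) m).get? k
      = (m.get? k).or (pvPhaseB L k) := by
  induction L generalizing m with
  | nil => simp [pvPhaseB]
  | cons p rest ih =>
    simp only [List.foldl_cons]
    rw [ih, inner_get]
    rw [Option.or_assoc]
    congr 1
    simp only [pvPhaseB]
    split <;> simp

theorem buildMapA_eq_phaseB (sequence_def : List (List (String × List String))) (k : String) :
    (pvBuildMapA sequence_def).get? k = pvPhaseB (PySem.List.enumerate sequence_def) k := by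
  unfold pvBuildMapA
  rw [outer_get, PySem.Dict.get?_empty, Option.none_or]

-- every phase B finds is a nonnegative enumerate index
theorem phaseB_nonneg (L : List (Int × List (String × List String)))
    (hL : ∀ p ∈ L, (0 : Int) ≤ p.1) (k : String) :
    ∀ v, pvPhaseB L k = some v → 0 ≤ v := by
  induction L with
  | nil => intro v h; simp [pvPhaseB] at h
  | cons p rest ih =>
    intro v h
    simp only [pvPhaseB] at h
    split at h
    · cases h; exact hL p (by simp)
    · exact ih (fun q hq => hL q (by simp [hq])) v h

theorem enumerate_nonneg (sequence_def : List (List (String × List String))) :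
    ∀ p ∈ PySem.List.enumerate sequence_def 0, (0 : Int) ≤ p.1 := by
  intro p hp
  rcases (PySem.List.mem_enumerate_iff sequence_def 0 p).1 hp with ⟨j, hj, rfl⟩
  simp

-- A's second loop over event_types equals the pure scan over the mapped phases
theorem scan_filterMap (m : PySem.Dict String Int) (ets : List String) (st : Int × Int) :
    ets.foldl
      (fun (st : Int × Int) et =>
        if m.contains et then
          let phase := (m.get? et).getD 0
          let violations := if phase < st.1 then st.2 + 1 else st.2
          (max st.1 phase, violations)
        else st) st
    = (ets.filterMap (fun et => m.get? et)).foldl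
        (fun (st : Int × Int) x => (max st.1 x, if x < st.1 then st.2 + 1 else st.2)) st := by
  induction ets generalizing st with
  | nil => rfl
  | cons et ets ih =>
    have hc : m.contains et = (m.get? et).isSome := PySem.Dict.contains_eq_isSome_get? m et
    cases h : m.get? et with
    | none =>
      simp only [List.foldl_cons, List.filterMap_cons, h, hc, Option.isSome_none,
        Bool.false_eq_true, if_false]
      exact ih st
    | some x =>
      simp only [List.foldl_cons, List.filterMap_cons, h, hc, Option.isSome_some, if_true,
        Option.getD_some]
      exact ih _

-- the violation count ends at 0 iff the phases form a ≤-chain below the seed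
theorem scan_zero_iff (ps : List Int) (l v : Int) (hv : 0 ≤ v) :
    ((ps.foldl (fun (st : Int × Int) x => (max st.1 x, if x < st.1 then st.2 + 1 else st.2)) (l, v)).2 = 0)
      ↔ (v = 0 ∧ List.IsChain (· ≤ ·) (l :: ps)) := by
  induction ps generalizing l v with
  | nil => simp
  | cons x ps ih =>
    simp only [List.foldl_cons, List.isChain_cons_cons]
    by_cases hx : x < l
    · rw [if_pos hx, ih (max l x) (v + 1) (by omega)]
      constructor
      · rintro ⟨h1, -⟩; omega
      · rintro ⟨-, h2, -⟩; omega
    · rw [if_neg hx, ih (max l x) v hv]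
      have hmx : max l x = x := by omega
      rw [hmx]
      constructor
      · rintro ⟨h1, h2⟩; exact ⟨h1, by omega, h2⟩
      · rintro ⟨h1, -, h3⟩; exact ⟨h1, h3⟩

-- with nonnegative phases the seed -1 is irrelevant
theorem chain_neg_one (ps : List Int) (h : ∀ x ∈ ps, 0 ≤ x) :
    List.IsChain (· ≤ ·) ((-1) :: ps) ↔ List.IsChain (· ≤ ·) ps := by
  cases ps with
  | nil => simp
  | cons a t =>
    rw [List.isChain_cons_cons]
    have ha : (0 : Int) ≤ a := h a (by simp)
    constructor
    · rintro ⟨-, h2⟩; exact h2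
    · intro h2; exact ⟨by omega, h2⟩

-- B's adjacent-pair test is the chain condition
theorem zip_all_iff_chain (ps : List Int) :
    (((ps.zip ps.tail).all (fun q => decide (q.1 ≤ q.2))) = true) ↔ List.IsChain (· ≤ ·) ps := by
  induction ps with
  | nil => simp
  | cons a t ih =>
    cases t with
    | nil => simp
    | cons b t' =>
      simp only [List.tail_cons, List.zip_cons_cons, List.all_cons, Bool.and_eq_true,
        decide_eq_true_eq, List.isChain_cons_cons]
      rw [← ih]
      simp [List.tail_cons]

-- ===== VERDICT (by name: the statement is the Claim_ definition above) =====
theorem check_event_order_py_spec : Claim_equal_check_event_order_py := by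
  intro event_types sequence_def _ _
  unfold Spec_check_event_order_py check_event_order_py check_event_order_py_alt
  dsimp only
  rw [scan_filterMap]
  have hfm : (fun et => (pvBuildMapA sequence_def).get? et)
      = fun et => pvPhaseB (PySem.List.enumerate sequence_def) et := by
    funext et; exact buildMapA_eq_phaseB sequence_def et
  rw [hfm]
  set ps := event_types.filterMap (fun et => pvPhaseB (PySem.List.enumerate sequence_def) et) with hps
  have hnn : ∀ x ∈ ps, (0 : Int) ≤ x := by
    intro x hx
    rw [hps, List.mem_filterMap] at hx
    rcases hx with ⟨et, -, h⟩
    exact phaseB_nonneg _ (enumerate_nonneg sequence_def) et x h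
  rw [Bool.eq_iff_iff]
  simp only [beq_iff_eq]
  rw [scan_zero_iff ps (-1) 0 le_rfl, chain_neg_one ps hnn, zip_all_iff_chain]
  tauto
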